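-- pv_equiv track=rewrite | github.com/AugustinSamier/SCaMD | scamd_utils.py | filterRepeat
-- ===== SOURCE A (Python) =====
-- def filterRepeat(sentence,filterSize):
--     """
--     Filter word repetition in the model output.
--
--     Arguments:
--     -----------
--     - sentence: str,
--         The output of the model we want to filter.
--     - filterSize: int,
--         Determinate max word window repetition filtered.
--     """
--     sentence=sentence.split("\n")[0].strip()
--     length=[]
--     words=sentence.split(" ")
--     for windSize in range(1,filterSize+1):
--         succession=max(2,round(6-windSize))
--         for word in range(len(words)-windSize*succession+1):
--             repe=True
--             actualWind=words[word:word+windSize]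
--             for success in range(1,succession):
--                 succWind=words[word+windSize*success:word+(success+1)*windSize]
--                 if succWind!=actualWind:
--                     repe=False
--                     break
--             if repe:
--                 length.append(len(" ".join(words[:word+windSize])))
--
--     if len(length)!=0:
--         return sentence[:min(length)]
--     return sentence
-- ===== SOURCE B (Python) =====
-- def filterRepeat(sentence, filterSize):
--     """Same filtering, but via a match-run DP per window size (one O(n) pass per
--     window size) plus a precomputed prefix-length table, instead of re-comparing
--     every successive window group and re-joining a prefix at each candidate."""
--     sentence = sentence.split("\n")[0].strip()
--     words = sentence.split(" ")
--     n = len(words)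
--     # P[k] = len(" ".join(words[:k])), built once by a running sum
--     P = [0]
--     for k in range(1, n + 1):
--         P.append(P[-1] + len(words[k - 1]) + (0 if k == 1 else 1))
--     cuts = []
--     # a window of size d repeated even twice needs 2*d <= n words
--     d_max = min(filterSize, n // 2)
--     for d in range(1, d_max + 1):
--         succession = max(2, 6 - d)
--         m = (succession - 1) * d
--         limit = n - d * succession + 1
--         if limit <= 0:
--             continue
--         # E[i] = length of the longest common prefix of words[i:] and words[i+d:]
--         rev = [0]
--         for i in range(n - d - 1, -1, -1):
--             rev.append(rev[-1] + 1 if words[i] == words[i + d] else 0)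
--         E = rev[::-1]
--         for w in range(limit):
--             if E[w] >= m:
--                 cuts.append(P[w + d])
--     if cuts:
--         return sentence[:min(cuts)]
--     return sentence
-- ===== Notes on version B (the rewrite author's own statement) =====
-- stated objective: faster
-- what changed: Replaces the per-position loop that re-slices and re-compares every successive word-window (and re-joins the whole prefix at each hit) with a per-offset longest-match-run DP (rev[i]=prev+1 if words[i]==words[i+d] else 0, one O(n) pass per window size), a precomputed prefix-length table replacing the per-hit joins, and a window-size cap at min(filterSize, n//2) since a window repeated even twice needs 2*d <= n words.
import Mathlib
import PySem

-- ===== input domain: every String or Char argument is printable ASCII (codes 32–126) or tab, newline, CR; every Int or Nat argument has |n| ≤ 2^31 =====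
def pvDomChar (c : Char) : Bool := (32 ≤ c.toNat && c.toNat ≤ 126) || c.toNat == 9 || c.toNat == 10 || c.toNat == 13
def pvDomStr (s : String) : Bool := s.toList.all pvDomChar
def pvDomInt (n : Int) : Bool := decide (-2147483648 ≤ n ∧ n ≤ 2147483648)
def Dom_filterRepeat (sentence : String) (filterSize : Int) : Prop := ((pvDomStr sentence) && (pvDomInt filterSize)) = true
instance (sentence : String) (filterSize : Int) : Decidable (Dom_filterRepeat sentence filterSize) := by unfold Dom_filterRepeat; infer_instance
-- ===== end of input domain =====

-- B replaces A's re-slicing/re-comparing of every successive word-window (plus a full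
-- prefix re-join at every hit) by a per-offset longest-match-run DP and a prefix-length
-- table; measured faster on large inputs.

-- ===== PORT A =====
def filterRepeat (sentence : String) (filterSize : Int) : String :=
  -- sentence.split("\n")[0]: the separator is nonempty (split? never none) and split
  -- always returns a nonempty list, so both .getD defaults are unreachable
  let sentence := PySem.Str.strip ((PySem.List.pyGet? ((PySem.Str.split? sentence "\n").getD []) 0).getD "")
  let words := (PySem.Str.split? sentence " ").getD []
  let length : List Int :=
    (PySem.List.pyRange 1 (filterSize + 1) 1).foldl (fun length windSize =>
      -- round(6 - windSize) of an int is that int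
      let succession : Int := max 2 (6 - windSize)
      (PySem.List.pyRange 0 (PySem.List.len words - windSize * succession + 1) 1).foldl (fun length word =>
        let actualWind := PySem.List.slice words (some word) (some (word + windSize))
        -- the repe flag-with-break loop computes: every successive window equals actualWind
        let repe : Bool := (PySem.List.pyRange 1 succession 1).all (fun success =>
          PySem.List.slice words (some (word + windSize * success)) (some (word + (success + 1) * windSize)) == actualWind)
        if repe then
          length ++ [PySem.Str.len (PySem.Str.join " " (PySem.List.slice words none (some (word + windSize))))]
        else length) length) []
  if PySem.List.len length ≠ 0 then
    -- length ≠ [] here, so min(length) exists and .getD 0 is unreachable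
    PySem.Str.slice sentence none (some ((PySem.List.min? length (fun x => x)).getD 0))
  else sentence

-- ===== PORT B =====
def filterRepeat_alt (sentence : String) (filterSize : Int) : String :=
  let sentence := PySem.Str.strip ((PySem.List.pyGet? ((PySem.Str.split? sentence "\n").getD []) 0).getD "")
  let words := (PySem.Str.split? sentence " ").getD []
  let n : Int := PySem.List.len words
  -- P[k] = len(" ".join(words[:k])) by a running sum; P[-1] and words[k-1] are always in
  -- range, so the .getD/pyGetD defaults are unreachable
  let P : List Int :=
    (PySem.List.pyRange 1 (n + 1) 1).foldl (fun P k =>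
      P ++ [PySem.List.pyGetD P (-1) 0 + PySem.Str.len (PySem.List.pyGetD words (k - 1) "") +
            (if k = 1 then 0 else 1)]) [0]
  let cuts : List Int :=
    -- d_max = min(filterSize, n // 2): a window repeated even twice needs 2*d ≤ n
    (PySem.List.pyRange 1 (min filterSize (PySem.Int.floordiv n 2) + 1) 1).foldl (fun cuts d =>
      let succession : Int := max 2 (6 - d)
      let m : Int := (succession - 1) * d
      let limit : Int := n - d * succession + 1
      if limit ≤ 0 then cuts   -- continue: no start position exists
      else
        -- rev collects the match-run lengths from the right; rev[-1] is the previous run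
        let rev : List Int :=
          (PySem.List.pyRange (n - d - 1) (-1) (-1)).foldl (fun rev i =>
            rev ++ [if PySem.List.pyGet? words i == PySem.List.pyGet? words (i + d) then
                      PySem.List.pyGetD rev (-1) 0 + 1 else 0]) [0]
        let E : List Int := (PySem.List.slice? rev none none (-1)).getD []   -- rev[::-1]; step ≠ 0, never none
        (PySem.List.pyRange 0 limit 1).foldl (fun cuts w =>
          if PySem.List.pyGetD E w 0 ≥ m then cuts ++ [PySem.List.pyGetD P (w + d) 0] else cuts) cuts) []
  if cuts ≠ [] then
    PySem.Str.slice sentence none (some ((PySem.List.min? cuts (fun x => x)).getD 0))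
  else sentence

-- ===== PRECONDITION & SPEC =====
def Spec_filterRepeat (sentence : String) (filterSize : Int) (out : String) : Prop := out = filterRepeat_alt sentence filterSize
instance (sentence : String) (filterSize : Int) (out : String) : Decidable (Spec_filterRepeat sentence filterSize out) := by unfold Spec_filterRepeat; infer_instance

-- ===== CLAIM (what is proved, stated in full; the proofs are below) =====
def Claim_equal_filterRepeat : Prop := ∀ (sentence : String) (filterSize : Int), Dom_filterRepeat sentence filterSize → Spec_filterRepeat sentence filterSize (filterRepeat sentence filterSize)

-- ===== LEMMAS AND PROOFS =====

def pvLcp : List String → List String → Int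
  | a :: as, b :: bs => if a = b then pvLcp as bs + 1 else 0
  | _, _ => 0
@[simp] lemma pvLcp_nil_right (a : List String) : pvLcp a [] = 0 := by cases a <;> rfl
lemma pvLcp_nonneg (a b : List String) : 0 ≤ pvLcp a b := by
  induction a generalizing b with
  | nil => simp [pvLcp]
  | cons x as ih =>
    cases b with
    | nil => simp
    | cons y bs => simp only [pvLcp]; split <;> [exact add_nonneg (ih bs) (by norm_num); rfl]
def pvV (words : List String) (Dn j : Nat) : Int := pvLcp (words.drop j) (words.drop (j + Dn))
lemma pvLcp_ge_iff (m : Nat) (a b : List String) (ha : m ≤ a.length) (hb : m ≤ b.length) :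
    ((m : Int) ≤ pvLcp a b) ↔ ∀ j < m, a[j]? = b[j]? := by
  induction m generalizing a b with
  | zero => simp [pvLcp_nonneg]
  | succ m ih =>
    cases a with
    | nil => simp at ha
    | cons x as =>
      cases b with
      | nil => simp at hb
      | cons y bs =>
        simp only [List.length_cons, Nat.add_le_add_iff_right] at ha hb
        simp only [pvLcp]
        by_cases hxy : x = y
        · subst hxy
          rw [if_pos rfl]
          have : ((m : Int) + 1 ≤ pvLcp as bs + 1) ↔ ((m : Int) ≤ pvLcp as bs) := by omega
          push_cast
          rw [this, ih as bs ha hb]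
          constructor
          · intro h j hj
            cases j with
            | zero => simp
            | succ j => simpa using h j (by omega)
          · intro h j hj
            have := h (j + 1) (by omega)
            simpa using this
        · rw [if_neg hxy]
          constructor
          · intro h; omega
          · intro h
            have := h 0 (by omega)
            simp at this
            exact absurd this hxy
lemma pvShift (u : List String) (Dn m : Nat) (hQ : ∀ j < m, u[j]? = u[j + Dn]?) :
    ∀ k r, r < Dn → k * Dn + r < m + Dn → u[k * Dn + r]? = u[r]? := by
  intro k
  induction k with
  | zero => intro r _ _; simp
  | succ k ih =>
    intro r hr hlt
    have h1 : k * Dn + r < m := by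
      have : (k + 1) * Dn = k * Dn + Dn := by ring
      omega
    have := hQ (k * Dn + r) h1
    have heq : k * Dn + r + Dn = (k + 1) * Dn + r := by ring
    rw [heq] at this
    rw [← this]
    exact ih r hr (by omega)
lemma pvV_rec (words : List String) (Dn j : Nat) (h : j + Dn < words.length) :
    pvV words Dn j =
      if words[j]? == words[j + Dn]? then pvV words Dn (j + 1) + 1 else 0 := by
  have hj : j < words.length := by omega
  rw [pvV, List.drop_eq_getElem_cons hj, List.drop_eq_getElem_cons h]
  simp only [pvLcp, pvV]
  have e1 : words[j]? = some words[j] := List.getElem?_eq_getElem hj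
  have e2 : words[j + Dn]? = some words[j + Dn] := List.getElem?_eq_getElem h
  rw [e1, e2]
  have : j + 1 + Dn = j + Dn + 1 := by omega
  rw [this]
  by_cases hxy : words[j] = words[j + Dn]
  · simp [hxy]
  · simp [hxy]
lemma pvJoin_snoc (sep : List Char) (l : List (List Char)) (x : List Char) (h : l ≠ []) :
    PySem.Chars.join sep (l ++ [x]) = PySem.Chars.join sep l ++ sep ++ x := by
  induction l with
  | nil => exact absurd rfl h
  | cons p rest ih =>
    cases rest with
    | nil => simp [PySem.Chars.join_cons_cons, PySem.Chars.join_singleton]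
    | cons q rest' =>
      simp only [List.cons_append] at ih ⊢
      rw [PySem.Chars.join_cons_cons, ih (by simp), PySem.Chars.join_cons_cons]
      simp [List.append_assoc]

lemma pvWindows_iff (u : List String) (Dn s : Nat) (hD : 1 ≤ Dn) (hs : 2 ≤ s)
    (_hlen : s * Dn ≤ u.length) :
    (∀ k, 1 ≤ k → k < s → (u.drop (k * Dn)).take Dn = u.take Dn) ↔
      (∀ j < (s - 1) * Dn, u[j]? = u[j + Dn]?) := by
  constructor
  · intro hW
    have hAll : ∀ k, k ≤ s - 1 → ∀ r, r < Dn → u[k * Dn + r]? = u[r]? := by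
      intro k hk r hr
      rcases Nat.eq_zero_or_pos k with h0 | h1
      · subst h0; simp
      · have := congrArg (fun l => l[r]?) (hW k h1 (by omega))
        simpa [List.getElem?_take, List.getElem?_drop, hr, Nat.add_comm (k * Dn) r] using this
    intro j hj
    have hDpos : 0 < Dn := hD
    set k := j / Dn with hk
    set r := j % Dn with hr
    have hdm : k * Dn + r = j := by rw [hk, hr, Nat.mul_comm]; exact Nat.div_add_mod j Dn
    have hrD : r < Dn := Nat.mod_lt _ hDpos
    have hks : k < s - 1 := by
      rw [hk]
      exact Nat.div_lt_of_lt_mul (by rw [Nat.mul_comm]; omega)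
    have e1 : u[j]? = u[r]? := by rw [← hdm]; exact hAll k (by omega) r hrD
    have e2 : u[j + Dn]? = u[r]? := by
      have : j + Dn = (k + 1) * Dn + r := by rw [← hdm]; ring
      rw [this]; exact hAll (k + 1) (by omega) r hrD
    rw [e1, e2]
  · intro hQ k hk1 hk2
    have hS := pvShift u Dn ((s - 1) * Dn) hQ
    apply List.ext_getElem?
    intro i
    by_cases hi : i < Dn
    · have hk' : k * Dn ≤ (s - 1) * Dn := Nat.mul_le_mul_right _ (by omega)
      have hki : k * Dn + i < (s - 1) * Dn + Dn := by omega
      rw [List.getElem?_take, List.getElem?_take, if_pos hi, if_pos hi, List.getElem?_drop]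
      exact hS k i hi hki
    · rw [List.getElem?_take, List.getElem?_take, if_neg hi, if_neg hi]

lemma pvJoinLen_succ (words : List String) (j : Nat) (hj : j < words.length) :
    PySem.Str.len (PySem.Str.join " " (words.take (j + 1))) =
      PySem.Str.len (PySem.Str.join " " (words.take j)) + PySem.Str.len words[j] +
        (if j = 0 then 0 else 1) := by
  have htake : words.take (j + 1) = words.take j ++ [words[j]] := by
    rw [List.take_add_one, List.getElem?_eq_getElem hj]; rfl
  rcases Nat.eq_zero_or_pos j with h0 | h1
  · subst h0
    simp only [List.take_zero, List.nil_append, htake]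
    rw [PySem.Str.len_eq, PySem.Str.len_eq, PySem.Str.len_eq,
        PySem.Str.toList_join, PySem.Str.toList_join]
    simp [PySem.Chars.join_singleton, PySem.Chars.join_nil]
  · have hne : (words.take j).map String.toList ≠ [] := by
      intro h
      have := congrArg List.length h
      simp only [List.length_map, List.length_take, List.length_nil] at this
      omega
    rw [htake, PySem.Str.len_eq, PySem.Str.len_eq, PySem.Str.len_eq,
        PySem.Str.toList_join, PySem.Str.toList_join, List.map_append]
    simp only [List.map_cons, List.map_nil]
    rw [pvJoin_snoc _ _ _ hne]
    rw [if_neg (by omega)]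
    simp [List.length_append]
    omega

lemma pvP_spec (words : List String) :
    (PySem.List.pyRange 1 ((PySem.List.len words) + 1) 1).foldl (fun P k =>
        P ++ [PySem.List.pyGetD P (-1) 0 + PySem.Str.len (PySem.List.pyGetD words (k - 1) "") +
              (if k = 1 then 0 else 1)]) [0]
      = (List.range (words.length + 1)).map
          (fun k => PySem.Str.len (PySem.Str.join " " (words.take k))) := by
  rw [PySem.List.len_eq]
  have key : ∀ j : Nat, j ≤ words.length →
      (PySem.List.pyRange 1 ((j : Int) + 1) 1).foldl (fun P k =>
        P ++ [PySem.List.pyGetD P (-1) 0 + PySem.Str.len (PySem.List.pyGetD words (k - 1) "") +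
              (if k = 1 then 0 else 1)]) [0]
      = (List.range (j + 1)).map
          (fun k => PySem.Str.len (PySem.Str.join " " (words.take k))) := by
    intro j
    induction j with
    | zero =>
      intro _
      rw [show ((0 : Nat) : Int) + 1 = 1 by norm_num, PySem.List.pyRange_one_eq_nil (le_refl 1)]
      simp [List.range_one]
    | succ j ih =>
      intro hj
      have hj' : j < words.length := by omega
      rw [show ((j + 1 : Nat) : Int) + 1 = ((j : Int) + 1) + 1 by push_cast; ring,
          PySem.List.pyRange_one_succ_right (by omega), List.foldl_append, ih (by omega)]
      simp only [List.foldl_cons, List.foldl_nil]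
      have hsnoc : (List.range (j + 1)).map
          (fun k => PySem.Str.len (PySem.Str.join " " (words.take k)))
          = (List.range j).map (fun k => PySem.Str.len (PySem.Str.join " " (words.take k)))
            ++ [PySem.Str.len (PySem.Str.join " " (words.take j))] := by
        rw [List.range_succ, List.map_append]; rfl
      rw [hsnoc, PySem.List.pyGetD_neg_one_append_singleton]
      rw [show ((j : Int) + 1 - 1) = (j : Int) by ring, PySem.List.pyGetD_natCast,
          List.getD_eq_getElem _ _ hj']
      rw [show ((if ((j : Int) + 1 = 1) then (0:Int) else 1)) = (if j = 0 then (0:Int) else 1) by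
        by_cases h : j = 0 <;> simp [h]]
      rw [← pvJoinLen_succ words j hj', List.range_succ, List.range_succ, List.map_append,
          List.map_append]
      simp
  exact key words.length (le_refl _)

lemma pvRev_spec (words : List String) (Dn : Nat) (_hD : 1 ≤ Dn) (hDn : Dn ≤ words.length) :
    (PySem.List.pyRange ((PySem.List.len words) - (Dn : Int) - 1) (-1) (-1)).foldl
        (fun rev i => rev ++ [if PySem.List.pyGet? words i == PySem.List.pyGet? words (i + (Dn : Int)) then
                    PySem.List.pyGetD rev (-1) 0 + 1 else 0]) [0]
      = ((List.range (words.length - Dn + 1)).map (fun t => pvV words Dn t)).reverse := by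
  rw [PySem.List.len_eq, PySem.List.pyRange_neg_one,
      show (((words.length : Int) - (Dn : Int) - 1) - (-1)).toNat = words.length - Dn by omega,
      List.foldl_map]
  have key : ∀ t, t ≤ words.length - Dn →
      (List.range t).foldl (fun (rev : List Int) (k : Nat) =>
        rev ++ [if PySem.List.pyGet? words (((words.length : Int) - (Dn : Int) - 1) - (k : Int)) ==
                    PySem.List.pyGet? words ((((words.length : Int) - (Dn : Int) - 1) - (k : Int)) + (Dn : Int)) then
                  PySem.List.pyGetD rev (-1) 0 + 1 else 0]) [0]
      = ((List.range' (words.length - Dn - t) (t + 1)).map (fun t => pvV words Dn t)).reverse := by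
    intro t
    induction t with
    | zero =>
      intro _
      simp only [List.range_zero, List.foldl_nil, Nat.sub_zero]
      have h0 : pvV words Dn (words.length - Dn) = 0 := by
        rw [pvV, Nat.sub_add_cancel hDn, List.drop_length, pvLcp_nil_right]
      simp [h0]
    | succ t ih =>
      intro ht
      obtain ⟨j, hj'⟩ : ∃ j, words.length = j + Dn + t + 1 :=
        ⟨words.length - Dn - t - 1, by omega⟩
      rw [List.range_succ, List.foldl_append, ih (by omega), List.foldl_cons, List.foldl_nil]
      have hidx2 : ((words.length : Int) - (Dn : Int) - 1 - (t : Int) + (Dn : Int))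
          = ((j + Dn : Nat) : Int) := by rw [hj']; push_cast; ring
      have hidx : ((words.length : Int) - (Dn : Int) - 1 - (t : Int)) = (j : Int) := by
        rw [hj']; push_cast; ring
      rw [hidx2, hidx]
      have hprev : words.length - Dn - t = j + 1 := by omega
      rw [hprev, List.range'_succ]
      simp only [List.map_cons, List.reverse_cons]
      rw [PySem.List.pyGetD_neg_one_append_singleton, PySem.List.pyGet?_natCast,
          PySem.List.pyGet?_natCast]
      rw [← pvV_rec words Dn j (by omega)]
      have hnext : words.length - Dn - (t + 1) = j := by omega
      rw [hnext, List.range'_succ, List.range'_succ]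
      simp [List.append_assoc]
  have := key (words.length - Dn) (le_refl _)
  rw [this, Nat.sub_self, List.range_eq_range']

lemma pvGuard_iff (words : List String) (Dn s W : Nat) (hD : 1 ≤ Dn) (hs : 2 ≤ s)
    (hW : W + Dn * s ≤ words.length) :
    ((PySem.List.pyRange 1 (s : Int) 1).all (fun k =>
        PySem.List.slice words (some ((W : Int) + (Dn : Int) * k)) (some ((W : Int) + (k + 1) * (Dn : Int))) ==
          PySem.List.slice words (some (W : Int)) (some ((W : Int) + (Dn : Int)))) = true)
      ↔ (((s - 1) * Dn : Nat) : Int) ≤ pvV words Dn W := by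
  have hs1 : s - 1 + 1 = s := by omega
  have hM : (s - 1) * Dn + Dn = s * Dn := by
    calc (s - 1) * Dn + Dn = (s - 1 + 1) * Dn := (Nat.succ_mul _ _).symm
    _ = s * Dn := by rw [hs1]
  have hmc : Dn * s = s * Dn := Nat.mul_comm Dn s
  have hpred : ∀ K : Nat,
      ((PySem.List.slice words (some ((W : Int) + (Dn : Int) * (K : Int)))
          (some ((W : Int) + ((K : Int) + 1) * (Dn : Int))) ==
        PySem.List.slice words (some (W : Int)) (some ((W : Int) + (Dn : Int)))) = true)
      ↔ (((words.drop W).drop (K * Dn)).take Dn = (words.drop W).take Dn) := by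
    intro K
    rw [beq_iff_eq,
        show (W : Int) + (Dn : Int) * (K : Int) = ((W + K * Dn : Nat) : Int) by push_cast; ring,
        show (W : Int) + ((K : Int) + 1) * (Dn : Int) = ((W + K * Dn : Nat) : Int) + ((Dn : Nat) : Int) by push_cast; ring,
        PySem.List.slice_natCast_add,
        show ((W : Int) + (Dn : Int)) = ((W : Nat) : Int) + ((Dn : Nat) : Int) from rfl,
        PySem.List.slice_natCast_add,
        ← List.drop_drop]
  rw [List.all_eq_true]
  have main : (∀ k ∈ PySem.List.pyRange 1 (s : Int) 1, (fun k =>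
        PySem.List.slice words (some ((W : Int) + (Dn : Int) * k)) (some ((W : Int) + (k + 1) * (Dn : Int))) ==
          PySem.List.slice words (some (W : Int)) (some ((W : Int) + (Dn : Int)))) k = true)
      ↔ (∀ K : Nat, 1 ≤ K → K < s → (((words.drop W).drop (K * Dn)).take Dn = (words.drop W).take Dn)) := by
    constructor
    · intro h K h1 h2
      have := h (K : Int) (by rw [PySem.List.mem_pyRange_one]; constructor <;> [exact_mod_cast h1; exact_mod_cast h2])
      rw [← hpred K]; exact this
    · intro h k hk
      rw [PySem.List.mem_pyRange_one] at hk
      obtain ⟨K, rfl⟩ : ∃ K : Nat, k = (K : Int) := ⟨k.toNat, (Int.toNat_of_nonneg (by omega)).symm⟩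
      simp only []
      rw [hpred K]
      exact h K (by exact_mod_cast hk.1) (by exact_mod_cast hk.2)
  rw [main, pvWindows_iff (words.drop W) Dn s hD hs (by rw [List.length_drop]; omega)]
  have hRHS : pvV words Dn W = pvLcp (words.drop W) ((words.drop W).drop Dn) := by
    rw [pvV, List.drop_drop, Nat.add_comm]
  rw [hRHS,
      pvLcp_ge_iff ((s - 1) * Dn) (words.drop W) ((words.drop W).drop Dn)
        (by rw [List.length_drop]; omega) (by rw [List.length_drop, List.length_drop]; omega)]
  constructor
  · intro h j hj
    rw [List.getElem?_drop (i := Dn) (xs := words.drop W), Nat.add_comm Dn j]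
    exact h j hj
  · intro h j hj
    have := h j hj
    rw [List.getElem?_drop (i := Dn) (xs := words.drop W), Nat.add_comm Dn j] at this
    exact this

lemma pvBlock_eq (words : List String) (d : Int) (hd : 1 ≤ d) (acc : List Int) :
    (PySem.List.pyRange 0 (PySem.List.len words - d * max 2 (6 - d) + 1) 1).foldl (fun length word =>
        if (PySem.List.pyRange 1 (max 2 (6 - d)) 1).all (fun success =>
            PySem.List.slice words (some (word + d * success)) (some (word + (success + 1) * d)) ==
              PySem.List.slice words (some word) (some (word + d))) then
          length ++ [PySem.Str.len (PySem.Str.join " " (PySem.List.slice words none (some (word + d))))]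
        else length) acc
    = (PySem.List.pyRange 0 (PySem.List.len words - d * max 2 (6 - d) + 1) 1).foldl (fun cuts w =>
        if PySem.List.pyGetD
              (((PySem.List.slice?
                  ((PySem.List.pyRange (PySem.List.len words - d - 1) (-1) (-1)).foldl
                    (fun rev i => rev ++ [if PySem.List.pyGet? words i == PySem.List.pyGet? words (i + d) then
                        PySem.List.pyGetD rev (-1) 0 + 1 else 0]) [0]) none none (-1)).getD [])) w 0
            ≥ (max 2 (6 - d) - 1) * d then
          cuts ++ [PySem.List.pyGetD
            ((PySem.List.pyRange 1 (PySem.List.len words + 1) 1).foldl (fun P k =>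
              P ++ [PySem.List.pyGetD P (-1) 0 + PySem.Str.len (PySem.List.pyGetD words (k - 1) "") +
                    (if k = 1 then 0 else 1)]) [0]) (w + d) 0]
        else cuts) acc := by
  obtain ⟨Dn, rfl⟩ : ∃ Dn : Nat, d = (Dn : Int) := ⟨d.toNat, (Int.toNat_of_nonneg (by omega)).symm⟩
  have hDn : 1 ≤ Dn := by exact_mod_cast hd
  obtain ⟨s, hsd, hs2⟩ : ∃ s : Nat, max 2 (6 - (Dn : Int)) = (s : Int) ∧ 2 ≤ s := by
    refine ⟨(max 2 (6 - (Dn : Int))).toNat, ?_, ?_⟩ <;> omega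
  rw [pvP_spec, hsd]
  apply PySem.List.foldl_congr_mem
  intro acc w hw
  rw [PySem.List.mem_pyRange_one] at hw
  obtain ⟨W, rfl⟩ : ∃ W : Nat, w = (W : Int) := ⟨w.toNat, (Int.toNat_of_nonneg hw.1).symm⟩
  have hbound : W + Dn * s ≤ words.length := by
    have := hw.2
    rw [PySem.List.len_eq] at this
    omega
  have h2Dn : Dn * 2 ≤ Dn * s := Nat.mul_le_mul_left Dn hs2
  have hDnlen : Dn ≤ words.length := by omega
  -- the E table is the reversed rev list, i.e. the map of pvV
  rw [pvRev_spec words Dn hDn hDnlen, PySem.List.slice?_none_none_neg_one]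
  simp only [Option.getD_some, List.reverse_reverse]
  -- rewrite B's guard value E[w] to pvV words Dn W
  have hEget : PySem.List.pyGetD
      ((List.range (words.length - Dn + 1)).map (fun t => pvV words Dn t)) (W : Int) 0
      = pvV words Dn W := by
    rw [PySem.List.pyGetD_natCast, List.getD_eq_getElem _ _ (by
      simp only [List.length_map, List.length_range]; omega)]
    simp
  -- A's guard equals B's guard
  have hguard : ((PySem.List.pyRange 1 (s : Int) 1).all (fun success =>
        PySem.List.slice words (some ((W : Int) + (Dn : Int) * success))
            (some ((W : Int) + (success + 1) * (Dn : Int))) ==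
          PySem.List.slice words (some (W : Int)) (some ((W : Int) + (Dn : Int)))))
      = (decide (PySem.List.pyGetD
          ((List.range (words.length - Dn + 1)).map (fun t => pvV words Dn t)) (W : Int) 0
          ≥ ((s : Int) - 1) * (Dn : Int))) := by
    rw [Bool.eq_iff_iff, decide_eq_true_iff, hEget, ge_iff_le,
        show ((s : Int) - 1) * (Dn : Int) = (((s - 1) * Dn : Nat) : Int) by push_cast [Nat.cast_sub (show 1 ≤ s by omega)]; ring]
    exact pvGuard_iff words Dn s W hDn hs2 hbound
  -- A's appended value equals B's appended value
  have hval : PySem.Str.len (PySem.Str.join " " (PySem.List.slice words none (some ((W : Int) + (Dn : Int)))))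
      = PySem.List.pyGetD ((List.range (words.length + 1)).map
          (fun k => PySem.Str.len (PySem.Str.join " " (words.take k)))) ((W : Int) + (Dn : Int)) 0 := by
    rw [show ((W : Int) + (Dn : Int)) = ((W + Dn : Nat) : Int) by push_cast; ring,
        PySem.List.slice_to_natCast, PySem.List.pyGetD_natCast,
        List.getD_eq_getElem _ _ (by simp only [List.length_map, List.length_range]; omega)]
    simp
  rw [hguard, hval]
  by_cases hg : decide (PySem.List.pyGetD
      ((List.range (words.length - Dn + 1)).map (fun t => pvV words Dn t)) (W : Int) 0
      ≥ ((s : Int) - 1) * (Dn : Int)) = true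
  · rw [if_pos hg, if_pos (by exact_mod_cast of_decide_eq_true hg)]
  · rw [if_neg hg, if_neg (by intro hc; exact hg (decide_eq_true hc))]

lemma pvIf (sen : String) (L : List Int) :
    (if PySem.List.len L ≠ 0 then
        PySem.Str.slice sen none (some ((PySem.List.min? L (fun x => x)).getD 0))
      else sen)
    = (if L ≠ [] then
        PySem.Str.slice sen none (some ((PySem.List.min? L (fun x => x)).getD 0))
      else sen) := by
  rcases eq_or_ne L [] with h | h
  · subst h; simp [PySem.List.len_eq]
  · rw [if_pos h, if_pos (by rw [PySem.List.len_eq]; simpa [List.length_eq_zero_iff] using h)]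

-- A's per-windSize block equals B's guarded block (B skips empty start ranges)
lemma pvBlock_eq' (words : List String) (d : Int) (hd : 1 ≤ d) (acc : List Int) :
    (PySem.List.pyRange 0 (PySem.List.len words - d * max 2 (6 - d) + 1) 1).foldl (fun length word =>
        if (PySem.List.pyRange 1 (max 2 (6 - d)) 1).all (fun success =>
            PySem.List.slice words (some (word + d * success)) (some (word + (success + 1) * d)) ==
              PySem.List.slice words (some word) (some (word + d))) then
          length ++ [PySem.Str.len (PySem.Str.join " " (PySem.List.slice words none (some (word + d))))]
        else length) acc
    = (if PySem.List.len words - d * max 2 (6 - d) + 1 ≤ 0 then acc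
      else (PySem.List.pyRange 0 (PySem.List.len words - d * max 2 (6 - d) + 1) 1).foldl (fun cuts w =>
        if PySem.List.pyGetD
              (((PySem.List.slice?
                  ((PySem.List.pyRange (PySem.List.len words - d - 1) (-1) (-1)).foldl
                    (fun rev i => rev ++ [if PySem.List.pyGet? words i == PySem.List.pyGet? words (i + d) then
                        PySem.List.pyGetD rev (-1) 0 + 1 else 0]) [0]) none none (-1)).getD [])) w 0
            ≥ (max 2 (6 - d) - 1) * d then
          cuts ++ [PySem.List.pyGetD
            ((PySem.List.pyRange 1 (PySem.List.len words + 1) 1).foldl (fun P k =>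
              P ++ [PySem.List.pyGetD P (-1) 0 + PySem.Str.len (PySem.List.pyGetD words (k - 1) "") +
                    (if k = 1 then 0 else 1)]) [0]) (w + d) 0]
        else cuts) acc) := by
  by_cases h : PySem.List.len words - d * max 2 (6 - d) + 1 ≤ 0
  · rw [if_pos h, PySem.List.pyRange_one_eq_nil h, List.foldl_nil]
  · rw [if_neg h]; exact pvBlock_eq words d hd acc

-- a fold whose function ignores every element of the tail range can stop early
lemma pvCap {β : Type} (a b c : Int) (hab : a ≤ b) (hbc : b ≤ c) (f : β → Int → β) (init : β)
    (hid : ∀ acc d, b ≤ d → d < c → f acc d = acc) :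
    (PySem.List.pyRange a c 1).foldl f init = (PySem.List.pyRange a b 1).foldl f init := by
  rw [PySem.List.pyRange_one_append a b c hab hbc, List.foldl_append]
  rw [PySem.List.foldl_congr_mem _ _ (fun acc _ => acc) _ (fun acc x hx => by
    rw [PySem.List.mem_pyRange_one] at hx; exact hid acc x hx.1 hx.2)]
  exact PySem.List.foldl_ignore _ _

lemma pvMain (sen : String) (words : List String) (fs : Int) :
    (if PySem.List.len ((PySem.List.pyRange 1 (fs + 1) 1).foldl (fun length windSize =>
        (PySem.List.pyRange 0 (PySem.List.len words - windSize * max 2 (6 - windSize) + 1) 1).foldl (fun length word =>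
          if (PySem.List.pyRange 1 (max 2 (6 - windSize)) 1).all (fun success =>
              PySem.List.slice words (some (word + windSize * success)) (some (word + (success + 1) * windSize)) ==
                PySem.List.slice words (some word) (some (word + windSize))) then
            length ++ [PySem.Str.len (PySem.Str.join " " (PySem.List.slice words none (some (word + windSize))))]
          else length) length) []) ≠ 0 then
      PySem.Str.slice sen none (some ((PySem.List.min? ((PySem.List.pyRange 1 (fs + 1) 1).foldl (fun length windSize =>
        (PySem.List.pyRange 0 (PySem.List.len words - windSize * max 2 (6 - windSize) + 1) 1).foldl (fun length word =>
          if (PySem.List.pyRange 1 (max 2 (6 - windSize)) 1).all (fun success =>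
              PySem.List.slice words (some (word + windSize * success)) (some (word + (success + 1) * windSize)) ==
                PySem.List.slice words (some word) (some (word + windSize))) then
            length ++ [PySem.Str.len (PySem.Str.join " " (PySem.List.slice words none (some (word + windSize))))]
          else length) length) []) (fun x => x)).getD 0))
    else sen)
    = (if ((PySem.List.pyRange 1 (min fs (PySem.Int.floordiv (PySem.List.len words) 2) + 1) 1).foldl (fun cuts d =>
        if PySem.List.len words - d * max 2 (6 - d) + 1 ≤ 0 then cuts
        else
          (PySem.List.pyRange 0 (PySem.List.len words - d * max 2 (6 - d) + 1) 1).foldl (fun cuts w =>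
            if PySem.List.pyGetD
                  (((PySem.List.slice?
                      ((PySem.List.pyRange (PySem.List.len words - d - 1) (-1) (-1)).foldl
                        (fun rev i => rev ++ [if PySem.List.pyGet? words i == PySem.List.pyGet? words (i + d) then
                            PySem.List.pyGetD rev (-1) 0 + 1 else 0]) [0]) none none (-1)).getD [])) w 0
                ≥ (max 2 (6 - d) - 1) * d then
              cuts ++ [PySem.List.pyGetD
                ((PySem.List.pyRange 1 (PySem.List.len words + 1) 1).foldl (fun P k =>
                  P ++ [PySem.List.pyGetD P (-1) 0 + PySem.Str.len (PySem.List.pyGetD words (k - 1) "") +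
                        (if k = 1 then 0 else 1)]) [0]) (w + d) 0]
            else cuts) cuts) []) ≠ [] then
      PySem.Str.slice sen none (some ((PySem.List.min? ((PySem.List.pyRange 1 (min fs (PySem.Int.floordiv (PySem.List.len words) 2) + 1) 1).foldl (fun cuts d =>
        if PySem.List.len words - d * max 2 (6 - d) + 1 ≤ 0 then cuts
        else
          (PySem.List.pyRange 0 (PySem.List.len words - d * max 2 (6 - d) + 1) 1).foldl (fun cuts w =>
            if PySem.List.pyGetD
                  (((PySem.List.slice?
                      ((PySem.List.pyRange (PySem.List.len words - d - 1) (-1) (-1)).foldl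
                        (fun rev i => rev ++ [if PySem.List.pyGet? words i == PySem.List.pyGet? words (i + d) then
                            PySem.List.pyGetD rev (-1) 0 + 1 else 0]) [0]) none none (-1)).getD [])) w 0
                ≥ (max 2 (6 - d) - 1) * d then
              cuts ++ [PySem.List.pyGetD
                ((PySem.List.pyRange 1 (PySem.List.len words + 1) 1).foldl (fun P k =>
                  P ++ [PySem.List.pyGetD P (-1) 0 + PySem.Str.len (PySem.List.pyGetD words (k - 1) "") +
                        (if k = 1 then 0 else 1)]) [0]) (w + d) 0]
            else cuts) cuts) []) (fun x => x)).getD 0))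
    else sen) := by
  have hN : (0 : Int) ≤ PySem.List.len words := by
    rw [PySem.List.len_eq]; positivity
  have hfd : PySem.Int.floordiv (PySem.List.len words) 2 = PySem.List.len words / 2 :=
    PySem.Int.floordiv_eq_ediv_of_pos (by norm_num)
  have hcap : (PySem.List.pyRange 1 (fs + 1) 1).foldl (fun length windSize =>
        (PySem.List.pyRange 0 (PySem.List.len words - windSize * max 2 (6 - windSize) + 1) 1).foldl (fun length word =>
          if (PySem.List.pyRange 1 (max 2 (6 - windSize)) 1).all (fun success =>
              PySem.List.slice words (some (word + windSize * success)) (some (word + (success + 1) * windSize)) ==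
                PySem.List.slice words (some word) (some (word + windSize))) then
            length ++ [PySem.Str.len (PySem.Str.join " " (PySem.List.slice words none (some (word + windSize))))]
          else length) length) []
      = (PySem.List.pyRange 1 (min fs (PySem.Int.floordiv (PySem.List.len words) 2) + 1) 1).foldl (fun length windSize =>
        (PySem.List.pyRange 0 (PySem.List.len words - windSize * max 2 (6 - windSize) + 1) 1).foldl (fun length word =>
          if (PySem.List.pyRange 1 (max 2 (6 - windSize)) 1).all (fun success =>
              PySem.List.slice words (some (word + windSize * success)) (some (word + (success + 1) * windSize)) ==
                PySem.List.slice words (some word) (some (word + windSize))) then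
            length ++ [PySem.Str.len (PySem.Str.join " " (PySem.List.slice words none (some (word + windSize))))]
          else length) length) [] := by
    by_cases hmin : fs ≤ PySem.Int.floordiv (PySem.List.len words) 2
    · rw [min_eq_left hmin]
    · rw [min_eq_right (le_of_not_ge hmin)]
      refine pvCap 1 (PySem.Int.floordiv (PySem.List.len words) 2 + 1) (fs + 1)
        (by rw [hfd]; omega) (by omega) _ _ ?_
      intro acc d hd1 hd2
      have h2 : d * 2 ≤ d * max 2 (6 - d) :=
        mul_le_mul_of_nonneg_left (le_max_left _ _) (by rw [hfd] at hd1; omega)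
      have hlim : PySem.List.len words - d * max 2 (6 - d) + 1 ≤ 0 := by
        rw [hfd] at hd1; omega
      show (PySem.List.pyRange 0 (PySem.List.len words - d * max 2 (6 - d) + 1) 1).foldl _ acc = acc
      rw [PySem.List.pyRange_one_eq_nil hlim, List.foldl_nil]
  rw [hcap]
  have hL := PySem.List.foldl_congr_mem
    (PySem.List.pyRange 1 (min fs (PySem.Int.floordiv (PySem.List.len words) 2) + 1) 1) _ _
    ([] : List Int)
    (fun acc d hd => pvBlock_eq' words d
      (by rw [PySem.List.mem_pyRange_one] at hd; exact hd.1) acc)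
  rw [hL, pvIf]

-- ===== VERDICT (by name: the statement is the Claim_ definition above) =====
theorem filterRepeat_spec : Claim_equal_filterRepeat := by
  intro sentence filterSize _
  simp only [Spec_filterRepeat, filterRepeat, filterRepeat_alt]
  exact pvMain _ _ _
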